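-- pv_equiv track=rewrite | github.com/hyohyo12/python_algorithm | baekjoon_review/2879_review.py | pretty_code
-- ===== SOURCE A (Python) =====
-- def pretty_code(req:list[int])->int:
--     tab = abs(req[-1])
--
--     for idx in range(len(req)-2,-1,-1):
--         if req[idx+1] == 0:
--             tab += abs(req[idx])
--             continue
--         if req[idx] < 0 and req[idx+1] <0 :
--             if abs(req[idx]) > abs(req[idx+1]):
--                 tab += abs(abs(req[idx]) - abs(req[idx+1]))
--         elif req[idx] > 0 and req[idx+1] > 0:
--             if req[idx] <= req[idx+1]:
--                 continue
--             else:
--                 tab += abs(req[idx]-req[idx+1])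
--         else:
--             tab += abs(req[idx])
--     return tab
-- ===== SOURCE B (Python) =====
-- def pretty_code(req: list[int]) -> int:
--     # Split each requirement into its positive and negative height profiles
--     # (with a trailing 0) and sum the downward steps of each profile.
--     pos = [max(x, 0) for x in req] + [0]
--     neg = [max(-x, 0) for x in req] + [0]
--     return sum(max(0, pos[i] - pos[i + 1]) + max(0, neg[i] - neg[i + 1])
--                for i in range(len(req)))
-- ===== Notes on version B (the rewrite author's own statement) =====
-- stated objective: simpler
-- what changed: Replaces the backward four-branch sign casework loop with one forward pass summing the downward steps of the positive and negative height profiles (with a trailing 0), with no case analysis.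
-- outside the precondition, e.g. on pretty_code([]): A raises IndexError, B returns 0
import Mathlib
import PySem

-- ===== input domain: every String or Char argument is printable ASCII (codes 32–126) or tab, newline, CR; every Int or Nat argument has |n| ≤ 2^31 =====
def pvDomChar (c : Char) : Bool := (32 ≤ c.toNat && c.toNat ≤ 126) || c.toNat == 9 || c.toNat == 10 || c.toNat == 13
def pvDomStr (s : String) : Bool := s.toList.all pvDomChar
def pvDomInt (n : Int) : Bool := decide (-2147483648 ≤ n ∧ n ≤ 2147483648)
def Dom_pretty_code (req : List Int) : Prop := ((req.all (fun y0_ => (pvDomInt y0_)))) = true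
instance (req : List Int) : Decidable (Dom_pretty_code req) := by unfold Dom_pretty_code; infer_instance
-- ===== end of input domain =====

-- B replaces A's backward four-branch sign casework with one forward pass summing the
-- downward steps of the positive and negative height profiles (objective: simpler).


-- ===== PORT A =====
def pretty_code (req : List Int) : Int :=
  match PySem.List.pyGet? req (-1) with
  | none => 0  -- indexing the last element raises IndexError on the empty list; excluded by Pre_pretty_code
  | some last =>
    (PySem.List.pyRange ((req.length : Int) - 2) (-1) (-1)).foldl
      (fun tab idx =>
        -- indices idx, idx+1 are in range here, so pyGetD is exact
        let x := PySem.List.pyGetD req idx 0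
        let y := PySem.List.pyGetD req (idx + 1) 0
        if y = 0 then tab + |x|
        else if x < 0 ∧ y < 0 then (if |x| > |y| then tab + |(|x| - |y|)| else tab)
        else if x > 0 ∧ y > 0 then (if x ≤ y then tab else tab + |x - y|)
        else tab + |x|)
      |last|

-- ===== PORT B =====
def pretty_code_alt (req : List Int) : Int :=
  let pos := req.map (fun x => max x 0) ++ [0]
  let neg := req.map (fun x => max (-x) 0) ++ [0]
  -- pos[i], pos[i+1] are always in range here (i < len req), so getD is exact
  ((List.range req.length).map (fun i =>
      max 0 (pos.getD i 0 - pos.getD (i + 1) 0) +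
      max 0 (neg.getD i 0 - neg.getD (i + 1) 0))).sum

-- ===== PRECONDITION & SPEC =====
-- Pre_ excludes only the empty list, on which A raises IndexError when reading the last element (B returns 0 there).
def Pre_pretty_code (req : List Int) : Prop := req ≠ []
instance (req : List Int) : Decidable (Pre_pretty_code req) := by unfold Pre_pretty_code; infer_instance
def pvWitness_pretty_code : List Int := ([3, -2, 0, 4])

def Spec_pretty_code (req : List Int) (out : Int) : Prop := out = pretty_code_alt req
instance (req : List Int) (out : Int) : Decidable (Spec_pretty_code req out) := by unfold Spec_pretty_code; infer_instance

-- ===== CLAIM (what is proved, stated in full; the proofs are below) =====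
def Claim_equal_pretty_code : Prop := ∀ (req : List Int), Dom_pretty_code req → Pre_pretty_code req → Spec_pretty_code req (pretty_code req)

-- ===== LEMMAS AND PROOFS =====

def pvContrib (x y : Int) : Int :=
  if y = 0 then |x|
  else if x < 0 ∧ y < 0 then (if |x| > |y| then |(|x| - |y|)| else 0)
  else if x > 0 ∧ y > 0 then (if x ≤ y then 0 else |x - y|)
  else |x|

def pvD (x y : Int) : Int :=
  max 0 (max x 0 - max y 0) + max 0 (max (-x) 0 - max (-y) 0)

lemma pvContrib_eq_pvD (x y : Int) : pvContrib x y = pvD x y := by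
  unfold pvContrib pvD
  simp only [abs_eq_max_neg]
  split_ifs <;> omega

lemma pvD_zero (x : Int) : pvD x 0 = |x| := by
  unfold pvD; rw [abs_eq_max_neg]; omega

lemma pv_getD_profile (f : Int → Int) (hf : f 0 = 0) (req : List Int) (i : Nat)
    (hi : i ≤ req.length) : (req.map f ++ [0]).getD i 0 = f (req.getD i 0) := by
  rcases lt_or_eq_of_le hi with h | h
  · rw [List.getD_eq_getElem?_getD, List.getElem?_append_left (by simpa using h)]
    simp [List.getElem?_map, List.getElem?_eq_getElem h, List.getD_eq_getElem?_getD]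
  · rw [List.getD_eq_getElem?_getD, List.getElem?_append_right (by simp [h])]
    simp [h, hf, List.getD_eq_getElem?_getD]

lemma pretty_code_eq_sum (req : List Int) (h : req ≠ []) :
    pretty_code req = |req.getLast h| +
      ((List.range (req.length - 1)).map
        (fun k => pvContrib (req.getD k 0) (req.getD (k + 1) 0))).sum := by
  unfold pretty_code
  rw [PySem.List.pyGet?_neg_one, List.getLast?_eq_some_getLast h]
  have hstep : (fun (tab idx : Int) =>
        let x := PySem.List.pyGetD req idx 0
        let y := PySem.List.pyGetD req (idx + 1) 0
        if y = 0 then tab + |x|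
        else if x < 0 ∧ y < 0 then (if |x| > |y| then tab + |(|x| - |y|)| else tab)
        else if x > 0 ∧ y > 0 then (if x ≤ y then tab else tab + |x - y|)
        else tab + |x|) =
      fun tab idx => tab + pvContrib (PySem.List.pyGetD req idx 0)
        (PySem.List.pyGetD req (idx + 1) 0) := by
    funext tab idx
    unfold pvContrib
    dsimp only
    split_ifs <;> ring
  rw [hstep]
  dsimp only
  rw [PySem.List.foldl_add, PySem.List.pyRange_neg_one_eq_reverse,
      List.map_reverse, List.sum_reverse]
  norm_num
  rw [show (req.length : Int) - 2 + 1 = ((req.length - 1 : Nat) : Int) by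
        have := List.length_pos_of_ne_nil h; omega,
      PySem.List.pyRange_zero_natCast, List.map_map]
  congr 1
  apply List.map_congr_left
  intro k hk
  simp only [List.mem_range] at hk
  simp only [Function.comp]
  rw [show ((k : Int) + 1) = ((k + 1 : Nat) : Int) by push_cast; ring]
  simp only [PySem.List.pyGetD_natCast, List.getD_eq_getElem?_getD]

lemma pretty_code_alt_eq_sum (req : List Int) :
    pretty_code_alt req =
      ((List.range req.length).map
        (fun i => pvD (req.getD i 0) (req.getD (i + 1) 0))).sum := by
  unfold pretty_code_alt
  dsimp only
  congr 1
  apply List.map_congr_left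
  intro i hi
  simp only [List.mem_range] at hi
  rw [pv_getD_profile _ (by simp) _ _ (le_of_lt hi), pv_getD_profile _ (by simp) _ _ (by omega),
      pv_getD_profile _ (by simp) _ _ (le_of_lt hi), pv_getD_profile _ (by simp) _ _ (by omega)]
  rfl


-- ===== VERDICT (by name: the statement is the Claim_ definition above) =====
theorem pretty_code_spec : Claim_equal_pretty_code := by
  intro req _ hpre
  unfold Pre_pretty_code at hpre
  unfold Spec_pretty_code
  rw [pretty_code_eq_sum req hpre, pretty_code_alt_eq_sum]
  have hn : req.length - 1 + 1 = req.length :=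
    Nat.succ_pred_eq_of_pos (List.length_pos_of_ne_nil hpre)
  rw [← hn, List.range_succ, List.map_append, List.sum_append]
  simp only [List.map_cons, List.map_nil, List.sum_cons, List.sum_nil, add_zero, hn]
  rw [show req.getD req.length 0 = 0 from List.getD_eq_default _ _ (le_refl _), pvD_zero,
      List.getD_eq_getElem _ _ (by omega), ← List.getLast_eq_getElem hpre]
  have : ∀ k ∈ List.range (req.length - 1),
      pvContrib (req.getD k 0) (req.getD (k + 1) 0) = pvD (req.getD k 0) (req.getD (k + 1) 0) :=
    fun k _ => pvContrib_eq_pvD _ _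
  rw [List.map_congr_left this]
  ring
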